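-- pv_equiv track=rewrite | github.com/jiuisdisciple/CAGtoJSON | json_analysis_reformed.py | check_three_vessel_PCI
-- ===== SOURCE A (Python) =====
-- def check_three_vessel_PCI(previous_stents, current_stents, dcb_deb, thrombus_aspiration):
--     rca_segments = {"1", "2", "3", "4", "16", "16a", "16b", "16c"}
--     lad_segments = {"6", "7", "8", "9", "9a", "10", "10a"}
--     lcx_segments = {"11", "12", "12a", "12b", "13", "14", "14a", "14b", "15"}
--
--     all_segments = set(current_stents) | set(dcb_deb) | set(thrombus_aspiration)
--
--     has_rca = any(seg in rca_segments for seg in all_segments)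
--     has_lad = any(seg in lad_segments for seg in all_segments)
--     has_lcx = any(seg in lcx_segments for seg in all_segments)
--
--     return has_rca and has_lad and has_lcx
-- ===== SOURCE B (Python) =====
-- # B: no sets at all -- a single early-exit scan over the raw concatenation of the
-- # three treated-segment lists, folding a 3-bit vessel mask (bit i set when a
-- # segment of GROUPS[i] has been seen); returns whether the mask reached 0b111.
-- GROUPS = (
--     ("1", "2", "3", "4", "16", "16a", "16b", "16c"),          # rca
--     ("6", "7", "8", "9", "9a", "10", "10a"),                  # lad
--     ("11", "12", "12a", "12b", "13", "14", "14a", "14b", "15"),  # lcx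
-- )
--
--
-- def check_three_vessel_PCI(previous_stents, current_stents, dcb_deb, thrombus_aspiration):
--     mask = 0
--     for seg in current_stents + dcb_deb + thrombus_aspiration:
--         for i, group in enumerate(GROUPS):
--             if seg in group:
--                 mask |= 1 << i
--         if mask == 7:
--             break
--     return mask == 7
-- ===== Notes on version B (the rewrite author's own statement) =====
-- stated objective: alternative
-- what changed: Replaces A's set unions and three any-scans by a single early-exit scan over the raw concatenation of the three lists, folding a 3-bit vessel mask (bit per coronary group) and testing mask == 7; no sets are built at all.
import Mathlib
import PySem

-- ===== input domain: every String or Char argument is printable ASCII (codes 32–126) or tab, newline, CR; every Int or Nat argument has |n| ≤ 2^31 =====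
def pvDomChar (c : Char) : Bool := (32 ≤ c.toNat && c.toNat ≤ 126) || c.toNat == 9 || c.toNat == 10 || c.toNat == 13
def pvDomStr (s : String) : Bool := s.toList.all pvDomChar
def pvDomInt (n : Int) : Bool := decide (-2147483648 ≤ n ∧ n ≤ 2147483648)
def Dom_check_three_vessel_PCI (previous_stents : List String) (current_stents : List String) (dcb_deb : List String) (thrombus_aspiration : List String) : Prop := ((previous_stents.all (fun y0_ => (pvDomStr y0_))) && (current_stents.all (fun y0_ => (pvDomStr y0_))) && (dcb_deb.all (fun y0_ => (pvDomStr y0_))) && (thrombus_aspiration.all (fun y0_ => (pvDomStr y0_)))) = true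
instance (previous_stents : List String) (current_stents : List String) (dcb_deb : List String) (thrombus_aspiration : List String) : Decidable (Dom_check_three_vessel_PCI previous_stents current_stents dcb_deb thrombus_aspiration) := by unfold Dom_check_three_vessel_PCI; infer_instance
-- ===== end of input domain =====

-- B drops A's set unions and three any-scans in favour of a single early-exit scan over the
-- concatenated lists folding a 3-bit vessel mask (objective: alternative decomposition, same cost).

-- ===== PORT A =====
def check_three_vessel_PCI (previous_stents : List String) (current_stents : List String) (dcb_deb : List String) (thrombus_aspiration : List String) : Bool :=
  let rca_segments : PySem.Set String := PySem.Set.ofList ["1","2","3","4","16","16a","16b","16c"]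
  let lad_segments : PySem.Set String := PySem.Set.ofList ["6","7","8","9","9a","10","10a"]
  let lcx_segments : PySem.Set String := PySem.Set.ofList ["11","12","12a","12b","13","14","14a","14b","15"]
  let all_segments : PySem.Set String :=
    PySem.Set.union (PySem.Set.union (PySem.Set.ofList current_stents) (PySem.Set.ofList dcb_deb)) (PySem.Set.ofList thrombus_aspiration)
  let has_rca := all_segments.any (fun seg => PySem.Set.contains rca_segments seg)
  let has_lad := all_segments.any (fun seg => PySem.Set.contains lad_segments seg)
  let has_lcx := all_segments.any (fun seg => PySem.Set.contains lcx_segments seg)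
  has_rca && has_lad && has_lcx

-- ===== PORT B =====
-- the module-level GROUPS tuple of Source B (tuples ported as lists)
def pvGroups : List (List String) :=
  [["1","2","3","4","16","16a","16b","16c"],
   ["6","7","8","9","9a","10","10a"],
   ["11","12","12a","12b","13","14","14a","14b","15"]]

-- Source B's inner 'for i, group in enumerate(GROUPS): if seg in group: mask |= 1 << i'
-- (enumerate ported as zipIdx, whose pairs are (group, i); Python's | and << are
-- PySem.Int.bor and Lean's <<<, both Python-exact)
def pvMaskStep (mask : Int) (seg : String) : Int :=
  pvGroups.zipIdx.foldl
    (fun m p => if p.1.contains seg then PySem.Int.bor m ((1 : Int) <<< p.2) else m) mask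

-- Source B's outer loop with its 'if mask == 7: break'
def pvMaskLoop : List String → Int → Int
  | [], mask => mask
  | seg :: rest, mask =>
    let m := pvMaskStep mask seg
    if m = 7 then m else pvMaskLoop rest m

def check_three_vessel_PCI_alt (previous_stents : List String) (current_stents : List String) (dcb_deb : List String) (thrombus_aspiration : List String) : Bool :=
  decide (pvMaskLoop (current_stents ++ dcb_deb ++ thrombus_aspiration) 0 = 7)

-- ===== PRECONDITION & SPEC =====
def Spec_check_three_vessel_PCI (previous_stents : List String) (current_stents : List String) (dcb_deb : List String) (thrombus_aspiration : List String) (out : Bool) : Prop := out = check_three_vessel_PCI_alt previous_stents current_stents dcb_deb thrombus_aspiration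
instance (previous_stents : List String) (current_stents : List String) (dcb_deb : List String) (thrombus_aspiration : List String) (out : Bool) : Decidable (Spec_check_three_vessel_PCI previous_stents current_stents dcb_deb thrombus_aspiration out) := by unfold Spec_check_three_vessel_PCI; infer_instance

-- ===== CLAIM (what is proved, stated in full; the proofs are below) =====
def Claim_equal_check_three_vessel_PCI : Prop := ∀ (previous_stents : List String) (current_stents : List String) (dcb_deb : List String) (thrombus_aspiration : List String), Dom_check_three_vessel_PCI previous_stents current_stents dcb_deb thrombus_aspiration → Spec_check_three_vessel_PCI previous_stents current_stents dcb_deb thrombus_aspiration (check_three_vessel_PCI previous_stents current_stents dcb_deb thrombus_aspiration)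

-- ===== LEMMAS AND PROOFS =====

-- the mask value holding exactly the vessel bits named by three Booleans
def pvEnc (r l c : Bool) : Int :=
  PySem.Int.bor (PySem.Int.bor (if r then 1 else 0) (if l then 2 else 0)) (if c then 4 else 0)

theorem pvMaskStep_enc (r l c : Bool) (seg : String) :
    pvMaskStep (pvEnc r l c) seg =
      pvEnc (r || (pvGroups[0]!).contains seg) (l || (pvGroups[1]!).contains seg)
            (c || (pvGroups[2]!).contains seg) := by
  cases h1 : (pvGroups[0]!).contains seg <;> cases h2 : (pvGroups[1]!).contains seg <;>
  cases h3 : (pvGroups[2]!).contains seg <;> cases r <;> cases l <;> cases c <;>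
    simp_all [pvMaskStep, pvEnc, pvGroups, List.zipIdx] <;> decide

theorem pvEnc_eq_seven (r l c : Bool) : pvEnc r l c = 7 ↔ (r && l && c) = true := by
  cases r <;> cases l <;> cases c <;> decide

theorem pvMaskLoop_enc (lst : List String) (r l c : Bool) :
    pvMaskLoop lst (pvEnc r l c) =
      pvEnc (r || lst.any (pvGroups[0]!).contains) (l || lst.any (pvGroups[1]!).contains)
            (c || lst.any (pvGroups[2]!).contains) := by
  induction lst generalizing r l c with
  | nil => simp [pvMaskLoop]
  | cons seg rest ih =>
    simp only [pvMaskLoop, pvMaskStep_enc]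
    split_ifs with h7
    · rw [pvEnc_eq_seven] at h7
      simp only [Bool.and_eq_true] at h7
      obtain ⟨⟨hr, hl⟩, hc⟩ := h7
      simp only [List.any_cons, ← Bool.or_assoc, hr, hl, hc, Bool.true_or]
    · rw [ih]
      simp [List.any_cons, Bool.or_assoc]

-- ===== VERDICT (by name: the statement is the Claim_ definition above) =====
theorem check_three_vessel_PCI_spec : Claim_equal_check_three_vessel_PCI := by
  intro previous_stents current_stents dcb_deb thrombus_aspiration _
  unfold Spec_check_three_vessel_PCI check_three_vessel_PCI check_three_vessel_PCI_alt
  have h0 : (0 : Int) = pvEnc false false false := by decide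
  rw [h0, pvMaskLoop_enc]
  rw [Bool.eq_iff_iff]
  simp only [Bool.and_eq_true, List.any_eq_true, PySem.Set.contains_iff, PySem.Set.mem_ofList,
    PySem.Set.mem_union, decide_eq_true_eq, pvEnc_eq_seven, Bool.false_or,
    List.mem_append, List.contains_eq_mem, pvGroups]
  simp only [List.getElem!_cons_zero, List.getElem!_cons_succ]
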